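-- pv_equiv track=rewrite | github.com/DacianGoina/ICS-copy | src/main/matching_utils.py | four_way_matching
-- ===== SOURCE A (Python) =====
-- def four_way_matching(m1_res_labels, m2_res_labels, m3_res_labels, m4_res_labels, m1_types, m2_types, m3_types, m4_types):
--     m1_normal_label, m1_anomalous_label = m1_types
--     m2_normal_label, m2_anomalous_label = m2_types
--     m3_normal_label, m3_anomalous_label = m3_types
--     m4_normal_label, m4_anomalous_label = m4_types
--
--     normal_instances_matches = 0
--     anomalous_instances_matches = 0
--     wrong_matches = 0
--     for l1_label, l2_label, l3_label, l4_label in zip(m1_res_labels, m2_res_labels, m3_res_labels, m4_res_labels):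
--         if l1_label == m1_normal_label and l2_label == m2_normal_label and l3_label == m3_normal_label and l4_label == m4_normal_label:
--             normal_instances_matches += 1
--         elif l1_label == m1_anomalous_label and l2_label == m2_anomalous_label and l3_label == m3_anomalous_label and l4_label == m4_anomalous_label:
--             anomalous_instances_matches += 1
--         else:
--             wrong_matches +=1
--
--     return (normal_instances_matches, anomalous_instances_matches, wrong_matches)
-- ===== SOURCE B (Python) =====
-- def four_way_matching(m1_res_labels, m2_res_labels, m3_res_labels, m4_res_labels, m1_types, m2_types, m3_types, m4_types):
--     n = min(len(m1_res_labels), len(m2_res_labels), len(m3_res_labels), len(m4_res_labels))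
--
--     def idx(labels, target):
--         return {i for i in range(n) if labels[i] == target}
--
--     normal_set = (idx(m1_res_labels, m1_types[0]) & idx(m2_res_labels, m2_types[0])
--                   & idx(m3_res_labels, m3_types[0]) & idx(m4_res_labels, m4_types[0]))
--     anomalous_set = (idx(m1_res_labels, m1_types[1]) & idx(m2_res_labels, m2_types[1])
--                      & idx(m3_res_labels, m3_types[1]) & idx(m4_res_labels, m4_types[1])) - normal_set
--     return (len(normal_set), len(anomalous_set), n - len(normal_set) - len(anomalous_set))
-- ===== Notes on version B (the rewrite author's own statement) =====
-- stated objective: alternative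
-- what changed: Replaces A's row-wise if/elif/else loop over zipped rows by a columnwise set algebra: for each model separately it builds the set of positions predicting its normal (resp. anomalous) label, intersects the four sets, takes anomalous minus normal to preserve the elif priority, and derives wrong = n - normal - anomalous.
import Mathlib
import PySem

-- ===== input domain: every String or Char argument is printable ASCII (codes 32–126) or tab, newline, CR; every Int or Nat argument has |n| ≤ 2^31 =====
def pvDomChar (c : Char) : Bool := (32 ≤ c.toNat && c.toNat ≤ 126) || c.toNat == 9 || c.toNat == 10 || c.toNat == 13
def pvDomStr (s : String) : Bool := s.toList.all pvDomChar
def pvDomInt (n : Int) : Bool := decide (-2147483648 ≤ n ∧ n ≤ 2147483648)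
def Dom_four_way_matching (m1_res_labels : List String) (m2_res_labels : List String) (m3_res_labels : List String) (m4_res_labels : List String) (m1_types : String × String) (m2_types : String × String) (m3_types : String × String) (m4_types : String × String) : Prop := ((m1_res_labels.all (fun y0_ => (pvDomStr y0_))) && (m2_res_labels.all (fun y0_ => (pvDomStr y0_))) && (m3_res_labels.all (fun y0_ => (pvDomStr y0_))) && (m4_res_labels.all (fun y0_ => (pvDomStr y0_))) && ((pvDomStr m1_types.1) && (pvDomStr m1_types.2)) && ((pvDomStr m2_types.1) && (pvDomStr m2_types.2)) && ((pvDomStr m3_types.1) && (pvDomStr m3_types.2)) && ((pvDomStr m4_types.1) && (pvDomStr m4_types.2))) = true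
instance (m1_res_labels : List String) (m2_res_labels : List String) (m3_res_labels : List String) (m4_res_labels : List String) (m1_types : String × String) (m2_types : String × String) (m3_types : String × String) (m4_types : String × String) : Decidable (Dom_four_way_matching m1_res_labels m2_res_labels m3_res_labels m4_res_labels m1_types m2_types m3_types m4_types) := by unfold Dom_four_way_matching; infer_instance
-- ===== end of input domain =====

-- B replaces A's row-wise if/elif/else loop by columnwise per-model index sets combined by
-- set intersection/difference; wrong = n - normal - anomalous (objective: alternative).


-- ===== PORT A =====
-- Python's zip over four lists, truncating to the shortest.
def pvZip4 : List String → List String → List String → List String → List (String × String × String × String)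
  | a :: as, b :: bs, c :: cs, d :: ds => (a, b, c, d) :: pvZip4 as bs cs ds
  | _, _, _, _ => []

def four_way_matching (m1_res_labels : List String) (m2_res_labels : List String) (m3_res_labels : List String) (m4_res_labels : List String) (m1_types : String × String) (m2_types : String × String) (m3_types : String × String) (m4_types : String × String) : Int × Int × Int :=
  let m1_normal_label := m1_types.1; let m1_anomalous_label := m1_types.2
  let m2_normal_label := m2_types.1; let m2_anomalous_label := m2_types.2
  let m3_normal_label := m3_types.1; let m3_anomalous_label := m3_types.2
  let m4_normal_label := m4_types.1; let m4_anomalous_label := m4_types.2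
  (pvZip4 m1_res_labels m2_res_labels m3_res_labels m4_res_labels).foldl
    (fun (acc : Int × Int × Int) t =>
      if t.1 = m1_normal_label ∧ t.2.1 = m2_normal_label ∧ t.2.2.1 = m3_normal_label ∧ t.2.2.2 = m4_normal_label then
        (acc.1 + 1, acc.2.1, acc.2.2)
      else if t.1 = m1_anomalous_label ∧ t.2.1 = m2_anomalous_label ∧ t.2.2.1 = m3_anomalous_label ∧ t.2.2.2 = m4_anomalous_label then
        (acc.1, acc.2.1 + 1, acc.2.2)
      else
        (acc.1, acc.2.1, acc.2.2 + 1))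
    (0, 0, 0)

-- ===== PORT B =====
-- A Python set of positions {i in range(n) | labels[i] == target} is represented by its
-- duplicate-free list of members in increasing order; only set algebra and sizes are used.
-- 'labels[i]? == some target' is exact for Python's labels[i] == target since every i < n is in range.
def pvIdxSet (n : Nat) (labels : List String) (target : String) : List Nat :=
  (List.range n).filter (fun i => labels[i]? == some target)

def pvInter (s t : List Nat) : List Nat := s.filter (fun i => t.contains i)
def pvDiff (s t : List Nat) : List Nat := s.filter (fun i => !(t.contains i))

def four_way_matching_alt (m1_res_labels : List String) (m2_res_labels : List String) (m3_res_labels : List String) (m4_res_labels : List String) (m1_types : String × String) (m2_types : String × String) (m3_types : String × String) (m4_types : String × String) : Int × Int × Int :=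
  let n := min (min (min m1_res_labels.length m2_res_labels.length) m3_res_labels.length) m4_res_labels.length
  let normalSet := pvInter (pvInter (pvInter (pvIdxSet n m1_res_labels m1_types.1) (pvIdxSet n m2_res_labels m2_types.1)) (pvIdxSet n m3_res_labels m3_types.1)) (pvIdxSet n m4_res_labels m4_types.1)
  let anomalousSet := pvDiff (pvInter (pvInter (pvInter (pvIdxSet n m1_res_labels m1_types.2) (pvIdxSet n m2_res_labels m2_types.2)) (pvIdxSet n m3_res_labels m3_types.2)) (pvIdxSet n m4_res_labels m4_types.2)) normalSet
  ((normalSet.length : Int), (anomalousSet.length : Int), (n : Int) - (normalSet.length : Int) - (anomalousSet.length : Int))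

-- ===== PRECONDITION & SPEC =====
def Spec_four_way_matching (m1_res_labels : List String) (m2_res_labels : List String) (m3_res_labels : List String) (m4_res_labels : List String) (m1_types : String × String) (m2_types : String × String) (m3_types : String × String) (m4_types : String × String) (out : Int × Int × Int) : Prop := out = four_way_matching_alt m1_res_labels m2_res_labels m3_res_labels m4_res_labels m1_types m2_types m3_types m4_types
instance (m1_res_labels : List String) (m2_res_labels : List String) (m3_res_labels : List String) (m4_res_labels : List String) (m1_types : String × String) (m2_types : String × String) (m3_types : String × String) (m4_types : String × String) (out : Int × Int × Int) : Decidable (Spec_four_way_matching m1_res_labels m2_res_labels m3_res_labels m4_res_labels m1_types m2_types m3_types m4_types out) := by unfold Spec_four_way_matching; infer_instance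

-- ===== CLAIM (what is proved, stated in full; the proofs are below) =====
def Claim_equal_four_way_matching : Prop := ∀ (m1_res_labels : List String) (m2_res_labels : List String) (m3_res_labels : List String) (m4_res_labels : List String) (m1_types : String × String) (m2_types : String × String) (m3_types : String × String) (m4_types : String × String), Dom_four_way_matching m1_res_labels m2_res_labels m3_res_labels m4_res_labels m1_types m2_types m3_types m4_types → Spec_four_way_matching m1_res_labels m2_res_labels m3_res_labels m4_res_labels m1_types m2_types m3_types m4_types (four_way_matching m1_res_labels m2_res_labels m3_res_labels m4_res_labels m1_types m2_types m3_types m4_types)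

-- ===== LEMMAS AND PROOFS =====
-- A's fold over the rows equals two countP's over the rows plus the derived third component.
theorem pvFold_char (nm an : String × String × String × String)
    (l : List (String × String × String × String)) (acc : Int × Int × Int) :
    l.foldl
      (fun (acc : Int × Int × Int) t =>
        if t.1 = nm.1 ∧ t.2.1 = nm.2.1 ∧ t.2.2.1 = nm.2.2.1 ∧ t.2.2.2 = nm.2.2.2 then
          (acc.1 + 1, acc.2.1, acc.2.2)
        else if t.1 = an.1 ∧ t.2.1 = an.2.1 ∧ t.2.2.1 = an.2.2.1 ∧ t.2.2.2 = an.2.2.2 then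
          (acc.1, acc.2.1 + 1, acc.2.2)
        else
          (acc.1, acc.2.1, acc.2.2 + 1)) acc
    = (acc.1 + (l.countP (fun r => ((r.1 == nm.1 && r.2.1 == nm.2.1) && r.2.2.1 == nm.2.2.1) && r.2.2.2 == nm.2.2.2) : Nat),
       acc.2.1 + (l.countP (fun r => (((r.1 == an.1 && r.2.1 == an.2.1) && r.2.2.1 == an.2.2.1) && r.2.2.2 == an.2.2.2)
                    && !(((r.1 == nm.1 && r.2.1 == nm.2.1) && r.2.2.1 == nm.2.2.1) && r.2.2.2 == nm.2.2.2)) : Nat),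
       acc.2.2 + ((l.length : Int)
         - (l.countP (fun r => ((r.1 == nm.1 && r.2.1 == nm.2.1) && r.2.2.1 == nm.2.2.1) && r.2.2.2 == nm.2.2.2) : Nat)
         - (l.countP (fun r => (((r.1 == an.1 && r.2.1 == an.2.1) && r.2.2.1 == an.2.2.1) && r.2.2.2 == an.2.2.2)
                    && !(((r.1 == nm.1 && r.2.1 == nm.2.1) && r.2.2.1 == nm.2.2.1) && r.2.2.2 == nm.2.2.2)) : Nat))) := by
  induction l generalizing acc with
  | nil => simp
  | cons h t ih =>
    obtain ⟨h1, h2, h3, h4⟩ := h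
    by_cases hn : h1 = nm.1 ∧ h2 = nm.2.1 ∧ h3 = nm.2.2.1 ∧ h4 = nm.2.2.2
    · have hbn : (((h1 == nm.1 && h2 == nm.2.1) && h3 == nm.2.2.1) && h4 == nm.2.2.2) = true := by
        simp [hn.1, hn.2.1, hn.2.2.1, hn.2.2.2]
      simp only [List.foldl_cons, List.countP_cons, List.length_cons, if_pos hn, ih, hbn,
        Bool.not_true, Bool.and_false, Prod.mk.injEq]
      refine ⟨by push_cast; ring, by push_cast; ring, by push_cast; ring⟩
    · have hbn : (((h1 == nm.1 && h2 == nm.2.1) && h3 == nm.2.2.1) && h4 == nm.2.2.2) = false := by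
        rcases Decidable.not_and_iff_not_or_not.mp hn with h' | h'
        · simp [h']
        rcases Decidable.not_and_iff_not_or_not.mp h' with h'' | h''
        · simp [h'']
        rcases Decidable.not_and_iff_not_or_not.mp h'' with h3' | h4'
        · simp [h3']
        · simp [h4']
      by_cases ha : h1 = an.1 ∧ h2 = an.2.1 ∧ h3 = an.2.2.1 ∧ h4 = an.2.2.2
      · have hba : (((h1 == an.1 && h2 == an.2.1) && h3 == an.2.2.1) && h4 == an.2.2.2) = true := by
          simp [ha.1, ha.2.1, ha.2.2.1, ha.2.2.2]
        simp only [List.foldl_cons, List.countP_cons, List.length_cons, if_neg hn, if_pos ha, ih,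
          hbn, hba, Bool.not_false, Bool.and_true, Prod.mk.injEq]
        refine ⟨by push_cast; ring, by push_cast; ring, by push_cast; ring⟩
      · have hba : (((h1 == an.1 && h2 == an.2.1) && h3 == an.2.2.1) && h4 == an.2.2.2) = false := by
          rcases Decidable.not_and_iff_not_or_not.mp ha with h' | h'
          · simp [h']
          rcases Decidable.not_and_iff_not_or_not.mp h' with h'' | h''
          · simp [h'']
          rcases Decidable.not_and_iff_not_or_not.mp h'' with h3' | h4'
          · simp [h3']
          · simp [h4']
        simp only [List.foldl_cons, List.countP_cons, List.length_cons, if_neg hn, if_neg ha, ih,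
          hbn, hba, Bool.false_and, Prod.mk.injEq]
        refine ⟨by push_cast; ring, by push_cast; ring, by push_cast; ring⟩

-- length of the zipped rows is the fold of mins (Python zip truncation)
theorem pvZip4_length (a b c d : List String) :
    (pvZip4 a b c d).length = min (min (min a.length b.length) c.length) d.length := by
  induction a generalizing b c d with
  | nil => cases b <;> cases c <;> cases d <;> simp [pvZip4]
  | cons x xs ih =>
    cases b with
    | nil => simp [pvZip4]
    | cons y ys =>
      cases c with
      | nil => simp [pvZip4]
      | cons z zs =>
        cases d with
        | nil => simp [pvZip4]
        | cons w ws =>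
          simp [pvZip4, ih, Nat.succ_min_succ]

-- counting a row predicate over the zipped rows = counting the index predicate over range n
theorem pvZip4_countP (p : String × String × String × String → Bool) :
    ∀ (a b c d : List String),
    (pvZip4 a b c d).countP p
    = (List.range (min (min (min a.length b.length) c.length) d.length)).countP
        (fun i => p ((getElem? a i).getD "", (getElem? b i).getD "", (getElem? c i).getD "", (getElem? d i).getD ""))
  | x :: xs, y :: ys, z :: zs, w :: ws => by
    rw [pvZip4, List.countP_cons]
    simp only [List.length_cons, Nat.succ_min_succ, List.range_succ_eq_map, List.countP_cons,
      List.countP_map, Function.comp_def, List.getElem?_cons_succ, List.getElem?_cons_zero, Option.getD_some]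
    rw [pvZip4_countP p xs ys zs ws]
    rfl
  | [], b, c, d => by simp [pvZip4]
  | a :: as, [], c, d => by simp [pvZip4]
  | a :: as, b :: bs, [], d => by simp [pvZip4]
  | a :: as, b :: bs, c :: cs, [] => by simp [pvZip4]

-- intersection / difference of range-filters are range-filters of the pointwise combination
theorem pvInter_range (n : Nat) (p q : Nat → Bool) :
    pvInter ((List.range n).filter p) ((List.range n).filter q)
    = (List.range n).filter (fun i => p i && q i) := by
  unfold pvInter
  rw [List.filter_filter]
  apply List.filter_congr
  intro i hi
  simp [List.mem_filter, List.mem_range.mp hi, Bool.and_comm]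

theorem pvDiff_range (n : Nat) (p q : Nat → Bool) :
    pvDiff ((List.range n).filter p) ((List.range n).filter q)
    = (List.range n).filter (fun i => p i && !q i) := by
  unfold pvDiff
  rw [List.filter_filter]
  apply List.filter_congr
  intro i hi
  simp [List.mem_filter, List.mem_range.mp hi, Bool.and_comm]

-- ===== VERDICT (by name: the statement is the Claim_ definition above) =====
theorem four_way_matching_spec : Claim_equal_four_way_matching := by
  intro m1 m2 m3 m4 t1 t2 t3 t4 _
  unfold Spec_four_way_matching four_way_matching four_way_matching_alt
  rw [pvFold_char (t1.1, t2.1, t3.1, t4.1) (t1.2, t2.2, t3.2, t4.2)]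
  simp only [pvIdxSet, pvInter_range, pvDiff_range, pvZip4_length]
  rw [pvZip4_countP (fun r => ((r.1 == t1.1 && r.2.1 == t2.1) && r.2.2.1 == t3.1) && r.2.2.2 == t4.1) m1 m2 m3 m4,
    pvZip4_countP (fun r => (((r.1 == t1.2 && r.2.1 == t2.2) && r.2.2.1 == t3.2) && r.2.2.2 == t4.2)
      && !(((r.1 == t1.1 && r.2.1 == t2.1) && r.2.2.1 == t3.1) && r.2.2.2 == t4.1)) m1 m2 m3 m4]
  simp only [List.countP_eq_length_filter]
  have key : ∀ (u1 u2 u3 u4 : String),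
      List.filter
        (fun i => (((getElem? m1 i).getD "" == u1 && (getElem? m2 i).getD "" == u2)
          && (getElem? m3 i).getD "" == u3) && (getElem? m4 i).getD "" == u4)
        (List.range (min (min (min m1.length m2.length) m3.length) m4.length))
      = List.filter
        (fun i => ((m1[i]? == some u1 && m2[i]? == some u2) && m3[i]? == some u3) && m4[i]? == some u4)
        (List.range (min (min (min m1.length m2.length) m3.length) m4.length)) := by
    intro u1 u2 u3 u4
    apply List.filter_congr
    intro i hi
    have hm := List.mem_range.mp hi
    have h1 : i < m1.length := by omega
    have h2 : i < m2.length := by omega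
    have h3 : i < m3.length := by omega
    have h4 : i < m4.length := by omega
    simp [List.getElem?_eq_getElem h1, List.getElem?_eq_getElem h2,
      List.getElem?_eq_getElem h3, List.getElem?_eq_getElem h4]
  have keyA : List.filter
        (fun i => ((((getElem? m1 i).getD "" == t1.2 && (getElem? m2 i).getD "" == t2.2)
          && (getElem? m3 i).getD "" == t3.2) && (getElem? m4 i).getD "" == t4.2)
          && !((((getElem? m1 i).getD "" == t1.1 && (getElem? m2 i).getD "" == t2.1)
          && (getElem? m3 i).getD "" == t3.1) && (getElem? m4 i).getD "" == t4.1))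
        (List.range (min (min (min m1.length m2.length) m3.length) m4.length))
      = List.filter
        (fun i => (((m1[i]? == some t1.2 && m2[i]? == some t2.2) && m3[i]? == some t3.2) && m4[i]? == some t4.2)
          && !(((m1[i]? == some t1.1 && m2[i]? == some t2.1) && m3[i]? == some t3.1) && m4[i]? == some t4.1))
        (List.range (min (min (min m1.length m2.length) m3.length) m4.length)) := by
    apply List.filter_congr
    intro i hi
    have hm := List.mem_range.mp hi
    have h1 : i < m1.length := by omega
    have h2 : i < m2.length := by omega
    have h3 : i < m3.length := by omega
    have h4 : i < m4.length := by omega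
    simp [List.getElem?_eq_getElem h1, List.getElem?_eq_getElem h2,
      List.getElem?_eq_getElem h3, List.getElem?_eq_getElem h4]
  rw [key t1.1 t2.1 t3.1 t4.1, keyA]
  simp
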